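-- pv_equiv track=rewrite | github.com/allanRoberto/api-neural | patterns/final.py | _get_confluence_pairs
-- ===== SOURCE A (Python) =====
-- from typing import List, Dict, Any, Optional, Tuple, Set
--
-- RODA = [0, 32, 15, 19, 4, 21, 2, 25, 17, 34, 6, 27, 13, 36, 11, 30, 8, 23, 10, 5, 24, 16, 33, 1, 20, 14, 31, 9, 22, 18, 29, 7, 28, 12, 35, 3, 26]
--
-- RODA_INDEX = {n: i for i, n in enumerate(RODA)}
--
-- def vizinhos(n: int) -> List[int]:
--     if n not in RODA_INDEX: return []
--     idx = RODA_INDEX[n]; L = len(RODA); return [RODA[(idx - 1) % L], RODA[(idx + 1) % L]]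
--
-- def get_terminal(n: Optional[int]) -> Optional[int]:
--     if n is None or n == 0: return None
--     return n % 10
--
-- TERMINAL_FAMILIES = {
--     0: [10, 20, 30],
--     1: [1, 11, 21, 31],
--     2: [2, 12, 22, 32],
--     3: [3, 13, 23, 33],
--     4: [4, 14, 24, 34],
--     5: [5, 15, 25, 35],
--     6: [6, 16, 26, 36],
--     7: [7, 17, 27],
--     8: [8, 18, 28],
--     9: [9, 19, 29]
-- }
--
-- def _get_confluence_pairs(t1: int, t2: int) -> Set[int]:
--     confluence_set = set()
--     fam_t1 = TERMINAL_FAMILIES.get(t1, [])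
--     if not fam_t1: return confluence_set
--     for n1 in fam_t1:
--         if not isinstance(n1, int) or not (1 <= n1 <= 36): continue
--         for n_viz in vizinhos(n1):
--             if not isinstance(n_viz, int) or not (1 <= n_viz <= 36): continue
--             t_viz = get_terminal(n_viz)
--             if t_viz == t2: confluence_set.add(n1)
--     return confluence_set
-- ===== SOURCE B (Python) =====
-- from typing import List, Dict, Any, Optional, Tuple, Set
--
-- RODA = [0, 32, 15, 19, 4, 21, 2, 25, 17, 34, 6, 27, 13, 36, 11, 30, 8, 23, 10, 5, 24, 16, 33, 1, 20, 14, 31, 9, 22, 18, 29, 7, 28, 12, 35, 3, 26]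
--
-- def _get_confluence_pairs(t1: int, t2: int) -> Set[int]:
--     # Single circular pass over the wheel: for every adjacent pair, record in
--     # near_t2 the number sitting next to a valid number with terminal t2; then
--     # the answer is the numbers 1..36 with terminal t1 that lie in near_t2.
--     L = len(RODA)
--     near_t2 = set()
--     for i, a in enumerate(RODA):
--         b = RODA[(i + 1) % L]
--         if b >= 1 and b % 10 == t2:
--             near_t2.add(a)
--         if a >= 1 and a % 10 == t2:
--             near_t2.add(b)
--     return {n for n in range(1, 37) if n % 10 == t1 and n in near_t2}
-- ===== Notes on version B (the rewrite author's own statement) =====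
-- stated objective: alternative
-- what changed: B drops the TERMINAL_FAMILIES/RODA_INDEX nested loops entirely: one circular pass over the wheel records every number adjacent to a valid number with terminal t2, then the result is the numbers 1..36 with terminal t1 found in that set, relying on the symmetry of wheel adjacency.
import Mathlib
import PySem

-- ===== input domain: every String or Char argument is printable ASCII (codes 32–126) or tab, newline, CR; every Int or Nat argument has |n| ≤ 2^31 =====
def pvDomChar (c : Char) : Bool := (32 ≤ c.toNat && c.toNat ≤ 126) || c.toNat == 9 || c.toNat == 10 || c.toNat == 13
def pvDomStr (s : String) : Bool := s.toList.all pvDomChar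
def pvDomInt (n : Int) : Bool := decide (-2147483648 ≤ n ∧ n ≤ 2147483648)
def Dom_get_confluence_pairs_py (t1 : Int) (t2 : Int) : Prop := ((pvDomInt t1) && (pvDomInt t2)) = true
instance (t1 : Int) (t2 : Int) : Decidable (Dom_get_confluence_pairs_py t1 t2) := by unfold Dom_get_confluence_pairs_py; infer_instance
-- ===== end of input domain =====

-- B replaces the nested family/neighbor loops (dict index + vizinhos) by one circular pass
-- over the wheel collecting neighbors of t2-terminal numbers, then one filter of 1..36
-- (objective: alternative decomposition, same cost).

-- ===== PORT A =====
def pvRODA : List Int := [0, 32, 15, 19, 4, 21, 2, 25, 17, 34, 6, 27, 13, 36, 11, 30, 8, 23, 10, 5, 24, 16, 33, 1, 20, 14, 31, 9, 22, 18, 29, 7, 28, 12, 35, 3, 26]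

-- RODA_INDEX = {n: i for i, n in enumerate(RODA)}  (used only by A's vizinhos)
def pvRodaIndex : PySem.Dict Int Int :=
  (PySem.List.enumerate pvRODA).foldl (fun d p => d.insert p.2 p.1) PySem.Dict.empty

def vizinhos (n : Int) : List Int :=
  if (pvRodaIndex.contains n) = false then []
  else
    let idx := (pvRodaIndex.get? n).getD 0   -- key is present on this branch, so getD's 0 is never used
    let L : Int := (pvRODA.length : Int)
    -- RODA[(idx ± 1) % L]: the index is in [0, L), so the pyGetD default 0 is never used
    [PySem.List.pyGetD pvRODA (PySem.Int.mod (idx - 1) L) 0,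
     PySem.List.pyGetD pvRODA (PySem.Int.mod (idx + 1) L) 0]

def get_terminal (n : Option Int) : Option Int :=
  match n with
  | none => none
  | some v => if v = 0 then none else some (PySem.Int.mod v 10)

def pvTerminalFamilies : PySem.Dict Int (List Int) :=
  PySem.Dict.ofList [(0, [10, 20, 30]), (1, [1, 11, 21, 31]), (2, [2, 12, 22, 32]),
    (3, [3, 13, 23, 33]), (4, [4, 14, 24, 34]), (5, [5, 15, 25, 35]),
    (6, [6, 16, 26, 36]), (7, [7, 17, 27]), (8, [8, 18, 28]), (9, [9, 19, 29])]

def get_confluence_pairs_py (t1 : Int) (t2 : Int) : List Int :=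
  let fam_t1 := pvTerminalFamilies.getD t1 []
  if fam_t1 = [] then PySem.Set.empty
  else
    fam_t1.foldl (fun cs n1 =>
      if ¬ (1 ≤ n1 ∧ n1 ≤ 36) then cs   -- isinstance(n1, int) is always true for the int elements
      else (vizinhos n1).foldl (fun cs n_viz =>
        if ¬ (1 ≤ n_viz ∧ n_viz ≤ 36) then cs
        else if get_terminal (some n_viz) = some t2 then PySem.Set.add cs n1 else cs) cs)
      PySem.Set.empty

-- ===== PORT B =====
def get_confluence_pairs_py_alt (t1 : Int) (t2 : Int) : List Int :=
  let L : Int := (pvRODA.length : Int)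
  let near_t2 := (PySem.List.enumerate pvRODA).foldl (fun s p =>
      let b := PySem.List.pyGetD pvRODA (PySem.Int.mod (p.1 + 1) L) 0
      let s := if 1 ≤ b ∧ PySem.Int.mod b 10 = t2 then PySem.Set.add s p.2 else s
      if 1 ≤ p.2 ∧ PySem.Int.mod p.2 10 = t2 then PySem.Set.add s b else s) PySem.Set.empty
  PySem.Set.ofList ((PySem.List.pyRange 1 37 1).filter
      (fun n => decide (PySem.Int.mod n 10 = t1) && PySem.Set.contains near_t2 n))

-- ===== PRECONDITION & SPEC =====
def Spec_get_confluence_pairs_py (t1 : Int) (t2 : Int) (out : List Int) : Prop := out = get_confluence_pairs_py_alt t1 t2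
instance (t1 : Int) (t2 : Int) (out : List Int) : Decidable (Spec_get_confluence_pairs_py t1 t2 out) := by unfold Spec_get_confluence_pairs_py; infer_instance

-- ===== CLAIM (what is proved, stated in full; the proofs are below) =====
def Claim_equal_get_confluence_pairs_py : Prop := ∀ (t1 : Int) (t2 : Int), Dom_get_confluence_pairs_py t1 t2 → Spec_get_confluence_pairs_py t1 t2 (get_confluence_pairs_py t1 t2)

-- ===== LEMMAS AND PROOFS =====

-- a key outside 0..9 is not in TERMINAL_FAMILIES
theorem pv_fam_out (t : Int) (h : t < 0 ∨ 9 < t) : pvTerminalFamilies.getD t [] = [] := by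
  have h0 : ¬ (t = 0) := by omega
  have h1 : ¬ (t = 1) := by omega
  have h2 : ¬ (t = 2) := by omega
  have h3 : ¬ (t = 3) := by omega
  have h4 : ¬ (t = 4) := by omega
  have h5 : ¬ (t = 5) := by omega
  have h6 : ¬ (t = 6) := by omega
  have h7 : ¬ (t = 7) := by omega
  have h8 : ¬ (t = 8) := by omega
  have h9 : ¬ (t = 9) := by omega
  simp [pvTerminalFamilies, PySem.Dict.ofList, PySem.Dict.update, List.foldl,
    PySem.Dict.getD_insert, PySem.Dict.getD_empty, h0,h1,h2,h3,h4,h5,h6,h7,h8,h9]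

-- v % 10 lies in [0, 10), so it never equals a t outside 0..9
theorem pv_mod_ne (t v : Int) (h : t < 0 ∨ 9 < t) : PySem.Int.mod v 10 ≠ t := by
  have hlo : 0 ≤ PySem.Int.mod v 10 := PySem.Int.mod_nonneg v (by norm_num)
  have hhi : PySem.Int.mod v 10 < 10 := PySem.Int.mod_lt v (by norm_num)
  omega

-- the same statement for Lean's own emod (the form simp normalizes to)
theorem pv_emod_ne (t v : Int) (h : t < 0 ∨ 9 < t) : v % 10 ≠ t := by
  have hlo : 0 ≤ v % 10 := Int.emod_nonneg v (by norm_num)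
  have hhi : v % 10 < 10 := Int.emod_lt_of_pos v (by norm_num)
  omega

theorem pv_terminal_ne (t2 v : Int) (h : t2 < 0 ∨ 9 < t2) (hv : 1 ≤ v) :
    get_terminal (some v) ≠ some t2 := by
  have hv0 : ¬ (v = 0) := by omega
  simp [get_terminal, hv0]
  exact pv_emod_ne t2 v h

theorem pv_inner_id (t2 n1 : Int) (h : t2 < 0 ∨ 9 < t2) (l : List Int) (cs : List Int) :
    l.foldl (fun cs n_viz =>
      if ¬ (1 ≤ n_viz ∧ n_viz ≤ 36) then cs
      else if get_terminal (some n_viz) = some t2 then PySem.Set.add cs n1 else cs) cs = cs := by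
  induction l generalizing cs with
  | nil => rfl
  | cons v l ih =>
    simp only [List.foldl]
    by_cases hr : 1 ≤ v ∧ v ≤ 36
    · rw [if_neg (not_not_intro hr), if_neg (pv_terminal_ne t2 v h hr.1)]
      exact ih cs
    · rw [if_pos hr]
      exact ih cs

-- when t2 is not a terminal, A never adds anything
theorem pv_A_empty_of_t2_out (t1 t2 : Int) (h : t2 < 0 ∨ 9 < t2) :
    get_confluence_pairs_py t1 t2 = [] := by
  by_cases hf : pvTerminalFamilies.getD t1 [] = []
  · simp only [get_confluence_pairs_py]
    rw [if_pos hf]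
    rfl
  · have : ∀ (l : List Int) (cs : List Int),
        l.foldl (fun cs n1 =>
          if ¬ (1 ≤ n1 ∧ n1 ≤ 36) then cs
          else (vizinhos n1).foldl (fun cs n_viz =>
            if ¬ (1 ≤ n_viz ∧ n_viz ≤ 36) then cs
            else if get_terminal (some n_viz) = some t2 then PySem.Set.add cs n1 else cs) cs) cs = cs := by
      intro l
      induction l with
      | nil => intro cs; rfl
      | cons n1 l ih =>
        intro cs
        simp only [List.foldl]
        by_cases hr : 1 ≤ n1 ∧ n1 ≤ 36
        · rw [if_neg (by simpa using hr), pv_inner_id t2 n1 h, ih]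
        · rw [if_pos (by simpa using hr), ih]
    simp only [get_confluence_pairs_py]
    rw [if_neg hf]
    exact this _ []

-- when t2 is not a terminal, B's near_t2 accumulator stays empty
theorem pv_near_id (t2 : Int) (h : t2 < 0 ∨ 9 < t2) (l : List (Int × Int)) (s : List Int) :
    l.foldl (fun s p =>
      let b := PySem.List.pyGetD pvRODA (PySem.Int.mod (p.1 + 1) ((pvRODA.length : Int))) 0
      let s := if 1 ≤ b ∧ PySem.Int.mod b 10 = t2 then PySem.Set.add s p.2 else s
      if 1 ≤ p.2 ∧ PySem.Int.mod p.2 10 = t2 then PySem.Set.add s b else s) s = s := by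
  induction l generalizing s with
  | nil => rfl
  | cons p l ih =>
    simp only [List.foldl]
    rw [if_neg (fun hc => pv_mod_ne t2 _ h hc.2), if_neg (fun hc => pv_mod_ne t2 _ h hc.2)]
    exact ih s

-- ===== VERDICT (by name: the statement is the Claim_ definition above) =====
set_option maxRecDepth 8000 in
theorem get_confluence_pairs_py_spec : Claim_equal_get_confluence_pairs_py := by
  intro t1 t2 _
  unfold Spec_get_confluence_pairs_py
  by_cases h1 : 0 ≤ t1 ∧ t1 ≤ 9
  · by_cases h2 : 0 ≤ t2 ∧ t2 ≤ 9
    · obtain ⟨a1, b1⟩ := h1; obtain ⟨a2, b2⟩ := h2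
      interval_cases t1 <;> interval_cases t2 <;> decide
    · -- t2 outside 0..9: both sides are empty
      have h2' : t2 < 0 ∨ 9 < t2 := by omega
      rw [pv_A_empty_of_t2_out t1 t2 h2']
      simp only [get_confluence_pairs_py_alt]
      rw [pv_near_id t2 h2']
      simp [PySem.Set.empty, PySem.Set.contains, PySem.Set.ofList]
  · -- t1 outside 0..9: A's family is empty, B's filter condition never holds
    have h1' : t1 < 0 ∨ 9 < t1 := by omega
    have hA : get_confluence_pairs_py t1 t2 = [] := by
      simp only [get_confluence_pairs_py]
      rw [pv_fam_out t1 h1', if_pos rfl]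
      rfl
    have hB : get_confluence_pairs_py_alt t1 t2 = [] := by
      simp only [get_confluence_pairs_py_alt]
      rw [List.filter_eq_nil_iff.mpr ?_]
      · rfl
      · intro n _
        simp [pv_emod_ne t1 n h1']
    rw [hA, hB]
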